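-- pv_equiv track=rewrite | github.com/HarshaVardhanReddy18/Hackerrank-problem-solving | Python Scripts/breaking the records.py | breakingRecords
-- ===== SOURCE A (Python) =====
-- def breakingRecords(scores):
--     m = scores[0]
--     k = scores[0]
--     icount = 0
--     dcount = 0
--     for i in range(len(scores)):
--         if m<scores[i]:
--             m = scores[i]
--             icount+=1
--         if k>scores[i]:
--             k = scores[i]
--             dcount+=1
--     return (icount,dcount)
-- ===== SOURCE B (Python) =====
-- def _running(f, scores):
--     out = []
--     for x in scores:
--         out.append(x if not out else f(out[-1], x))
--     return out
--
-- def breakingRecords(scores):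
--     # Two-phase: build running-max / running-min prefix lists, then count adjacent strict changes.
--     runmax = _running(max, scores)
--     runmin = _running(min, scores)
--     icount = sum(1 for a, b in zip(runmax, runmax[1:]) if b > a)
--     dcount = sum(1 for a, b in zip(runmin, runmin[1:]) if b < a)
--     return (icount, dcount)
-- ===== Notes on version B (the rewrite author's own statement) =====
-- stated objective: alternative
-- what changed: Replaces A's single interleaved record-tracking loop over indices with a two-phase plan: build running-max and running-min prefix lists, then count adjacent strict increases/decreases between consecutive prefix extremes.
import Mathlib
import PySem

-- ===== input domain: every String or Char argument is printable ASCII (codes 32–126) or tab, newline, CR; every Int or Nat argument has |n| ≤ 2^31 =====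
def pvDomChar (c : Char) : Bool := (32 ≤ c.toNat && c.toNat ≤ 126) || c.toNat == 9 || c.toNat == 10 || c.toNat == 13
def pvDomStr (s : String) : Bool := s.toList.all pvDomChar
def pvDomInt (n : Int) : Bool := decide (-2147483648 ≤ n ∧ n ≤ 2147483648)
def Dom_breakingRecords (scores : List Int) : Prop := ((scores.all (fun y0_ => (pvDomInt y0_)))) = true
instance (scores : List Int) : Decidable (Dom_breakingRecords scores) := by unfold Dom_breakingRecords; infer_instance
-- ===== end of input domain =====

-- B replaces A's single interleaved record-tracking loop with two running-extreme
-- prefix lists followed by an adjacent-difference count (alternative decomposition, same cost).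


-- ===== PORT A =====
-- loop body of A: the two independent if-updates on the state (m, k, icount, dcount)
def stepA (st : Int × Int × Int × Int) (x : Int) : Int × Int × Int × Int :=
  let m := st.1; let k := st.2.1; let ic := st.2.2.1; let dc := st.2.2.2
  let mi := if m < x then (x, ic + 1) else (m, ic)
  let kd := if k > x then (x, dc + 1) else (k, dc)
  (mi.1, kd.1, mi.2, kd.2)

-- m = scores[0]; k = scores[0]; for i in range(len(scores)): …; return (icount, dcount)
def breakingRecords (scores : List Int) : Int × Int :=
  let m0 := PySem.List.pyGetD scores 0 0
  let st := (PySem.List.pyRange 0 (scores.length : Int) 1).foldl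
    (fun st i => stepA st (PySem.List.pyGetD scores i 0)) (m0, m0, 0, 0)
  (st.2.2.1, st.2.2.2)

-- ===== PORT B =====
-- _running(f, scores): out.append(x if not out else f(out[-1], x))
def runBy (f : Int → Int → Int) (scores : List Int) : List Int :=
  scores.foldl
    (fun acc x => acc ++ [if acc.isEmpty then x else f (PySem.List.pyGetD acc (-1) 0) x]) []

-- runmax/runmin prefix lists, then count adjacent strict changes over zip(run, run[1:])
def breakingRecords_alt (scores : List Int) : Int × Int :=
  let runmax := runBy max scores
  let runmin := runBy min scores
  let icount : Int :=
    ((runmax.zip (PySem.List.slice runmax (some 1) none)).countP (fun p => decide (p.2 > p.1)) : Int)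
  let dcount : Int :=
    ((runmin.zip (PySem.List.slice runmin (some 1) none)).countP (fun p => decide (p.2 < p.1)) : Int)
  (icount, dcount)

-- ===== PRECONDITION & SPEC =====
-- Pre_ excludes only the empty list, on which A raises IndexError reading the first element.
def Pre_breakingRecords (scores : List Int) : Prop := scores ≠ []
instance (scores : List Int) : Decidable (Pre_breakingRecords scores) := by
  unfold Pre_breakingRecords; infer_instance
def pvWitness_breakingRecords : List Int := [3, 1, 2]

def Spec_breakingRecords (scores : List Int) (out : Int × Int) : Prop := out = breakingRecords_alt scores
instance (scores : List Int) (out : Int × Int) : Decidable (Spec_breakingRecords scores out) := by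
  unfold Spec_breakingRecords; infer_instance

-- ===== CLAIM (what is proved, stated in full; the proofs are below) =====
def Claim_equal_breakingRecords : Prop := ∀ (scores : List Int), Dom_breakingRecords scores → Pre_breakingRecords scores → Spec_breakingRecords scores (breakingRecords scores)

-- ===== LEMMAS AND PROOFS =====

-- number of running-max record breaks of t starting from current max a
def cntUp (a : Int) : List Int → Nat
  | [] => 0
  | x :: t => (if a < x then 1 else 0) + cntUp (max a x) t

-- number of running-min record breaks of t starting from current min a
def cntDn (a : Int) : List Int → Nat
  | [] => 0
  | x :: t => (if x < a then 1 else 0) + cntDn (min a x) t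

theorem foldA_eq (t : List Int) : ∀ (m k ic dc : Int),
    t.foldl stepA (m, k, ic, dc)
      = (t.foldl max m, t.foldl min k, ic + (cntUp m t : Int), dc + (cntDn k t : Int)) := by
  induction t with
  | nil => intro m k ic dc; simp [cntUp, cntDn]
  | cons x t ih =>
    intro m k ic dc
    simp only [List.foldl_cons, cntUp, cntDn, stepA]
    by_cases h1 : m < x <;> by_cases h2 : x < k
    · have hm : max m x = x := max_eq_right h1.le
      have hk : min k x = x := min_eq_right h2.le
      simp only [if_pos h1, gt_iff_lt, if_pos h2, ih, hm, hk, Prod.mk.injEq]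
      exact ⟨trivial, trivial, by push_cast; ring, by push_cast; ring⟩
    · have hm : max m x = x := max_eq_right h1.le
      have hk : min k x = k := min_eq_left (not_lt.mp h2)
      simp only [if_pos h1, gt_iff_lt, if_neg h2, ih, hm, hk, Prod.mk.injEq]
      exact ⟨trivial, trivial, by push_cast; ring, by push_cast; ring⟩
    · have hm : max m x = m := max_eq_left (not_lt.mp h1)
      have hk : min k x = x := min_eq_right h2.le
      simp only [if_neg h1, gt_iff_lt, if_pos h2, ih, hm, hk, Prod.mk.injEq]
      exact ⟨trivial, trivial, by push_cast; ring, by push_cast; ring⟩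
    · have hm : max m x = m := max_eq_left (not_lt.mp h1)
      have hk : min k x = k := min_eq_left (not_lt.mp h2)
      simp only [if_neg h1, gt_iff_lt, if_neg h2, ih, hm, hk, Prod.mk.injEq]
      exact ⟨trivial, trivial, by push_cast; ring, by push_cast; ring⟩

-- the append-building loop of _running, started on pre ++ [a], appends scanl f a t
theorem foldRun_eq (f : Int → Int → Int) (t : List Int) : ∀ (pre : List Int) (a : Int),
    t.foldl (fun acc x => acc ++ [if acc.isEmpty then x else f (PySem.List.pyGetD acc (-1) 0) x])
      (pre ++ [a])
    = pre ++ t.scanl f a := by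
  induction t with
  | nil => intro pre a; simp [List.scanl_nil]
  | cons x t ih =>
    intro pre a
    rw [List.scanl_cons, List.foldl_cons]
    have hne : (pre ++ [a]).isEmpty = false := by simp
    rw [hne, PySem.List.pyGetD_neg_one_append_singleton]
    simp only [Bool.false_eq_true, if_false, List.append_assoc, List.singleton_append]
    have := ih (pre ++ [a]) (f a x)
    simpa using this

theorem runBy_eq (f : Int → Int → Int) (x : Int) (t : List Int) :
    runBy f (x :: t) = t.scanl f x := by
  unfold runBy
  rw [List.foldl_cons]
  simpa using foldRun_eq f t [] x

-- scanl is never empty and starts with its seed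
theorem scanl_head (f : Int → Int → Int) (b : Int) (l : List Int) :
    l.scanl f b = b :: (l.scanl f b).tail := by
  cases l <;> simp [List.scanl_nil, List.scanl_cons]

-- counting adjacent strict increases along scanl max equals cntUp
theorem countUp_scanl (t : List Int) : ∀ (a : Int),
    ((t.scanl max a).zip ((t.scanl max a).tail)).countP (fun p => decide (p.2 > p.1)) = cntUp a t := by
  induction t with
  | nil => intro a; simp [List.scanl_nil, cntUp]
  | cons x t ih =>
    intro a
    rw [List.scanl_cons, cntUp]
    conv_lhs => rw [scanl_head max (max a x) t]
    simp only [List.tail_cons, List.zip_cons_cons, List.countP_cons]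
    rw [← scanl_head max (max a x) t, ih]
    by_cases h : a < x
    · simp [h, max_eq_right h.le, Nat.add_comm]
    · simp [h, max_eq_left (not_lt.mp h), GT.gt]

-- counting adjacent strict decreases along scanl min equals cntDn
theorem countDn_scanl (t : List Int) : ∀ (a : Int),
    ((t.scanl min a).zip ((t.scanl min a).tail)).countP (fun p => decide (p.2 < p.1)) = cntDn a t := by
  induction t with
  | nil => intro a; simp [List.scanl_nil, cntDn]
  | cons x t ih =>
    intro a
    rw [List.scanl_cons, cntDn]
    conv_lhs => rw [scanl_head min (min a x) t]
    simp only [List.tail_cons, List.zip_cons_cons, List.countP_cons]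
    rw [← scanl_head min (min a x) t, ih]
    by_cases h : x < a
    · simp [h, min_eq_right h.le, Nat.add_comm]
    · simp [h, min_eq_left (not_lt.mp h)]

-- ===== VERDICT (by name: the statement is the Claim_ definition above) =====
theorem breakingRecords_spec : Claim_equal_breakingRecords := by
  intro scores _ hpre
  obtain ⟨x, t, rfl⟩ : ∃ x t, scores = x :: t := by
    cases scores with
    | nil => exact absurd rfl hpre
    | cons x t => exact ⟨x, t, rfl⟩
  unfold Spec_breakingRecords breakingRecords breakingRecords_alt
  dsimp only
  rw [PySem.List.foldl_pyRange_zero_pyGetD' (x :: t) 0 stepA]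
  rw [runBy_eq, runBy_eq, PySem.List.slice_from_one, PySem.List.slice_from_one]
  simp only [PySem.List.pyGetD_zero_cons, List.foldl_cons]
  have hx : stepA (x, x, 0, 0) x = (x, x, 0, 0) := by simp [stepA]
  rw [hx, foldA_eq, countUp_scanl, countDn_scanl]
  simp
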